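-- pv_equiv track=rewrite | github.com/Corzo1/DawnOfDestinyNameGenerator | DawnOfDestiny.py | inputParse
-- ===== SOURCE A (Python) =====
-- def inputParse(userInput):
--     userInputParsed = 0
--     iVar2 = 0
--
--     for cVar1 in userInput:
--         iVar3 = iVar2 + 5
--         userInputParsed ^= (ord(cVar1) & 0xFF) << (iVar2 & 0x1F)
--         iVar2 = iVar3 if iVar3 < 0x18 else iVar2 - 0x13
--
--     return userInputParsed & 0xFFFFFFFF
-- ===== SOURCE B (Python) =====
-- def inputParse(userInput):
--     # Bucket the bytes by index mod 24 (XOR is commutative/associative and the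
--     # shift pattern (5*i) % 24 has period 24), then combine the 24 buckets.
--     buckets = [0] * 24
--     for i, c in enumerate(userInput):
--         buckets[i % 24] ^= ord(c) & 0xFF
--     h = 0
--     for j in range(24):
--         h ^= buckets[j] << (5 * j % 24)
--     return h & 0xFFFFFFFF
-- ===== Notes on version B (the rewrite author's own statement) =====
-- stated objective: alternative
-- what changed: B replaces A's single stateful pass (running shift counter with a wrap branch, XOR-accumulating shifted bytes) by a two-stage bucket scheme: it first XORs the bytes into a 24-entry table indexed by position mod 24, then combines the 24 buckets with their fixed shifts (5*j)%24; correct because XOR is commutative/associative and A's shift sequence has period 24.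
import Mathlib
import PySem

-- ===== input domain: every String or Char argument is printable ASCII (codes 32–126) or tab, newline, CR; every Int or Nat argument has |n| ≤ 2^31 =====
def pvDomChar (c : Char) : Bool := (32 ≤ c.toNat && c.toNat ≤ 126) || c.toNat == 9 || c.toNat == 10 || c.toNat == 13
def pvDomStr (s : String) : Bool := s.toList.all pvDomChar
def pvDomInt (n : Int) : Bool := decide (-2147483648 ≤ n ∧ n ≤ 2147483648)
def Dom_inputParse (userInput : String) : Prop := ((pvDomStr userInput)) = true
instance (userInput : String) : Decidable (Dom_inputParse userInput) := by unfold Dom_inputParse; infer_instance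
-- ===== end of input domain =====

-- B restructures A's single stateful pass into two stages: XOR the bytes into a 24-entry
-- bucket table indexed by position mod 24, then combine the buckets with their fixed shifts.

-- ===== PORT A =====
def inputParse (userInput : String) : Int :=
  let st := userInput.toList.foldl
    (fun (st : Int × Int) (cVar1 : Char) =>
      let iVar3 := st.2 + 5
      (PySem.Int.bxor st.1 ((PySem.Int.band (cVar1.toNat : Int) 255) <<< (PySem.Int.band st.2 31).toNat),
       if iVar3 < 24 then iVar3 else st.2 - 19))
    (0, 0)
  PySem.Int.band st.1 4294967295

-- ===== PORT B =====
-- buckets[i % 24] ^= … : the index i % 24 is always in range (list length 24), so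
-- `getD`/`List.set` are exact for Python's list read/item assignment here.
def inputParse_alt (userInput : String) : Int :=
  let buckets : List Int :=
    (PySem.List.enumerate userInput.toList).foldl
      (fun (bs : List Int) (p : Int × Char) =>
        bs.set (PySem.Int.mod p.1 24).toNat
          (PySem.Int.bxor (bs.getD (PySem.Int.mod p.1 24).toNat 0)
            (PySem.Int.band (p.2.toNat : Int) 255)))
      (List.replicate 24 0)
  let h : Int :=
    (PySem.List.pyRange 0 24 1).foldl
      (fun (h : Int) (j : Int) =>
        PySem.Int.bxor h ((buckets.getD j.toNat 0) <<< (PySem.Int.mod (5 * j) 24).toNat))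
      0
  PySem.Int.band h 4294967295

-- ===== PRECONDITION & SPEC =====
def Spec_inputParse (userInput : String) (out : Int) : Prop := out = inputParse_alt userInput
instance (userInput : String) (out : Int) : Decidable (Spec_inputParse userInput out) := by unfold Spec_inputParse; infer_instance

-- ===== CLAIM (what is proved, stated in full; the proofs are below) =====
def Claim_equal_inputParse : Prop := ∀ (userInput : String), Dom_inputParse userInput → Spec_inputParse userInput (inputParse userInput)

-- ===== LEMMAS AND PROOFS =====

-- Nat-level models of the two computations, used only in the proofs.
def pvSh (j : Nat) : Nat := (5 * j) % 24

def pvX : List Char → Nat → Nat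
  | [], _ => 0
  | c :: t, i => ((c.toNat &&& 255) <<< pvSh i) ^^^ pvX t (i + 1)

def pvBupd : List Char → Nat → List Nat → List Nat
  | [], _, nbs => nbs
  | c :: t, i, nbs => pvBupd t (i + 1) (nbs.set (i % 24) (nbs.getD (i % 24) 0 ^^^ (c.toNat &&& 255)))

def pvG (idxs : List Nat) (nbs : List Nat) (acc : Nat) : Nat :=
  idxs.foldl (fun h j => h ^^^ (nbs.getD j 0 <<< pvSh j)) acc

def pvFin (nbs : List Nat) : Nat := pvG (List.range 24) nbs 0

lemma pv_shl_xor (a b k : Nat) : (a ^^^ b) <<< k = (a <<< k) ^^^ (b <<< k) := by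
  apply Nat.eq_of_testBit_eq; intro i
  simp [Nat.testBit_shiftLeft, Nat.testBit_xor]
  cases Decidable.em (k ≤ i) <;> simp [*]

lemma pv_getD_set_self (l : List Nat) (i v : Nat) (h : i < l.length) :
    (l.set i v).getD i 0 = v := by
  simp [List.getD_eq_getElem?_getD, h]

lemma pv_getD_set_ne (l : List Nat) (i j v : Nat) (h : i ≠ j) :
    (l.set i v).getD j 0 = l.getD j 0 := by
  simp [List.getD_eq_getElem?_getD, List.getElem?_set_ne h]

lemma pvG_congr (idxs : List Nat) : ∀ (nbs nbs' : List Nat) (acc : Nat),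
    (∀ j ∈ idxs, nbs.getD j 0 = nbs'.getD j 0) →
    pvG idxs nbs acc = pvG idxs nbs' acc := by
  induction idxs with
  | nil => intro _ _ _ _; rfl
  | cons j t ih =>
    intro nbs nbs' acc h
    simp only [pvG, List.foldl_cons] at *
    rw [h j (by simp)]
    exact ih nbs nbs' _ (fun x hx => h x (by simp [hx]))

lemma pvG_acc (idxs : List Nat) : ∀ (nbs : List Nat) (a x : Nat),
    pvG idxs nbs (a ^^^ x) = pvG idxs nbs a ^^^ x := by
  induction idxs with
  | nil => intro _ _ _; rfl
  | cons j t ih =>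
    intro nbs a x
    simp only [pvG, List.foldl_cons]
    rw [Nat.xor_assoc, Nat.xor_comm x, ← Nat.xor_assoc]
    exact ih nbs _ x

lemma pv_range_split (j : Nat) (h : j < 24) :
    List.range 24 = List.range' 0 j ++ j :: List.range' (j + 1) (23 - j) := by
  rw [List.range_eq_range', show 24 = j + (24 - j) by omega, ← List.range'_append_1]
  congr 1
  rw [show 24 - j = (23 - j) + 1 by omega]
  simp [List.range'_succ]

lemma pv_fin_set (nbs : List Nat) (j x : Nat) (hj : j < 24) (hlen : nbs.length = 24) :
    pvFin (nbs.set j (nbs.getD j 0 ^^^ x)) = pvFin nbs ^^^ (x <<< pvSh j) := by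
  unfold pvFin
  rw [pv_range_split j hj]
  simp only [pvG, List.foldl_append, List.foldl_cons]
  have h1 : ∀ acc, (List.range' 0 j).foldl
      (fun h i => h ^^^ ((nbs.set j (nbs.getD j 0 ^^^ x)).getD i 0 <<< pvSh i)) acc
      = (List.range' 0 j).foldl (fun h i => h ^^^ (nbs.getD i 0 <<< pvSh i)) acc := by
    intro acc
    exact pvG_congr (List.range' 0 j) _ nbs acc
      (fun i hi => pv_getD_set_ne nbs j i _ (by have := List.mem_range'_1.mp hi; omega))
  have h2 : ∀ acc, (List.range' (j+1) (23-j)).foldl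
      (fun h i => h ^^^ ((nbs.set j (nbs.getD j 0 ^^^ x)).getD i 0 <<< pvSh i)) acc
      = (List.range' (j+1) (23-j)).foldl (fun h i => h ^^^ (nbs.getD i 0 <<< pvSh i)) acc := by
    intro acc
    exact pvG_congr (List.range' (j+1) (23-j)) _ nbs acc
      (fun i hi => pv_getD_set_ne nbs j i _ (by have := List.mem_range'_1.mp hi; omega))
  rw [show ((List.range' 0 j).foldl
        (fun h i => h ^^^ ((nbs.set j (nbs.getD j 0 ^^^ x)).getD i 0 <<< pvSh i)) 0)
      = ((List.range' 0 j).foldl (fun h i => h ^^^ (nbs.getD i 0 <<< pvSh i)) 0) from h1 0,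
      h2]
  rw [pv_getD_set_self nbs j _ (by omega)]
  rw [pv_shl_xor, ← Nat.xor_assoc]
  exact pvG_acc (List.range' (j+1) (23-j)) nbs _ _

lemma pv_core (l : List Char) : ∀ (s : Nat) (nbs : List Nat), nbs.length = 24 →
    pvFin (pvBupd l s nbs) = pvFin nbs ^^^ pvX l s := by
  induction l with
  | nil => intro s nbs _; simp [pvBupd, pvX]
  | cons c t ih =>
    intro s nbs hlen
    have hsh : pvSh (s % 24) = pvSh s := by unfold pvSh; omega
    simp only [pvBupd, pvX]
    rw [ih (s + 1) _ (by simp [hlen])]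
    rw [pv_fin_set nbs (s % 24) _ (Nat.mod_lt _ (by norm_num)) hlen]
    rw [hsh, Nat.xor_assoc]

-- Bridges between the Int-valued ports and the Nat models.
lemma pv_getD_map (nbs : List Nat) (j : Nat) :
    (nbs.map (fun (x : Nat) => (x : Int))).getD j 0 = ((nbs.getD j 0 : Nat) : Int) := by
  simp only [List.getD_eq_getElem?_getD, List.getElem?_map]
  cases nbs[j]? <;> simp

lemma pv_A (l : List Char) : ∀ (s a : Nat),
    (l.foldl
      (fun (st : Int × Int) (cVar1 : Char) =>
        let iVar3 := st.2 + 5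
        (PySem.Int.bxor st.1 ((PySem.Int.band (cVar1.toNat : Int) 255) <<< (PySem.Int.band st.2 31).toNat),
         if iVar3 < 24 then iVar3 else st.2 - 19))
      ((a : Int), (((5 * s) % 24 : Nat) : Int))).1
    = ((a ^^^ pvX l s : Nat) : Int) := by
  induction l with
  | nil => intro s a; simp [pvX]
  | cons c t ih =>
    intro s a
    have hshift : (PySem.Int.band (((5 * s) % 24 : Nat) : Int) 31).toNat = pvSh s := by
      rw [show (31 : Int) = ((31 : Nat) : Int) from rfl, PySem.Int.band_natCast]
      rw [show (5 * s) % 24 &&& 31 = (5 * s) % 24 by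
        rw [show (31 : Nat) = 2 ^ 5 - 1 from rfl, Nat.and_two_pow_sub_one_eq_mod]
        omega]
      exact Int.toNat_natCast _
    have hnext : (if (((5 * s) % 24 : Nat) : Int) + 5 < 24
        then (((5 * s) % 24 : Nat) : Int) + 5
        else (((5 * s) % 24 : Nat) : Int) - 19) = (((5 * (s + 1)) % 24 : Nat) : Int) := by
      split_ifs <;> omega
    simp only [List.foldl_cons, hnext, hshift]
    rw [show PySem.Int.band ((c.toNat : Nat) : Int) 255
        = (((c.toNat &&& 255 : Nat) : Nat) : Int) by
      rw [show (255 : Int) = ((255 : Nat) : Int) from rfl, PySem.Int.band_natCast]]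
    rw [show (((c.toNat &&& 255 : Nat) : Int)) <<< pvSh s
        = (((c.toNat &&& 255) <<< pvSh s : Nat) : Int) by simp]
    rw [PySem.Int.bxor_natCast]
    rw [ih (s + 1) (a ^^^ ((c.toNat &&& 255) <<< pvSh s))]
    simp [pvX, Nat.xor_assoc]

lemma pv_B_upd (l : List Char) : ∀ (s : Nat) (nbs : List Nat),
    (PySem.List.enumerate l (s : Int)).foldl
      (fun (bs : List Int) (p : Int × Char) =>
        bs.set (PySem.Int.mod p.1 24).toNat
          (PySem.Int.bxor (bs.getD (PySem.Int.mod p.1 24).toNat 0)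
            (PySem.Int.band (p.2.toNat : Int) 255)))
      (nbs.map (fun (x : Nat) => (x : Int)))
    = (pvBupd l s nbs).map (fun (x : Nat) => (x : Int)) := by
  induction l with
  | nil => intro s nbs; simp [PySem.List.enumerate_nil, pvBupd]
  | cons c t ih =>
    intro s nbs
    rw [PySem.List.enumerate_cons]
    simp only [List.foldl_cons]
    have hmod : (PySem.Int.mod ((s : Nat) : Int) 24).toNat = s % 24 := by
      rw [show (24 : Int) = ((24 : Nat) : Int) from rfl, PySem.Int.mod_natCast]
      exact Int.toNat_natCast _
    rw [hmod, pv_getD_map]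
    rw [show PySem.Int.band ((c.toNat : Nat) : Int) 255 = ((c.toNat &&& 255 : Nat) : Int) by
      rw [show (255 : Int) = ((255 : Nat) : Int) from rfl, PySem.Int.band_natCast]]
    rw [PySem.Int.bxor_natCast]
    rw [show (nbs.map (fun (x : Nat) => (x : Int))).set (s % 24)
          (((nbs.getD (s % 24) 0 ^^^ (c.toNat &&& 255) : Nat) : Int))
        = (nbs.set (s % 24) (nbs.getD (s % 24) 0 ^^^ (c.toNat &&& 255))).map
            (fun (x : Nat) => (x : Int)) from (List.map_set ..).symm]
    rw [show ((s : Nat) : Int) + 1 = (((s + 1 : Nat) : Nat) : Int) by push_cast; ring]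
    exact ih (s + 1) _

lemma pv_B_fin (idxs : List Nat) : ∀ (a : Nat) (nbs : List Nat),
    (idxs.map (fun (x : Nat) => (x : Int))).foldl
      (fun (h : Int) (j : Int) =>
        PySem.Int.bxor h
          (((nbs.map (fun (x : Nat) => (x : Int))).getD j.toNat 0) <<< (PySem.Int.mod (5 * j) 24).toNat))
      ((a : Int))
    = ((pvG idxs nbs a : Nat) : Int) := by
  induction idxs with
  | nil => intro a nbs; simp [pvG]
  | cons j t ih =>
    intro a nbs
    simp only [List.map_cons, List.foldl_cons]
    have hmod : (PySem.Int.mod (5 * ((j : Nat) : Int)) 24).toNat = pvSh j := by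
      rw [show 5 * ((j : Nat) : Int) = ((5 * j : Nat) : Int) by push_cast; ring,
          show (24 : Int) = ((24 : Nat) : Int) from rfl, PySem.Int.mod_natCast]
      exact Int.toNat_natCast _
    rw [hmod, Int.toNat_natCast, pv_getD_map]
    rw [show ((nbs.getD j 0 : Nat) : Int) <<< pvSh j = ((nbs.getD j 0 <<< pvSh j : Nat) : Int) by simp]
    rw [PySem.Int.bxor_natCast]
    rw [ih (a ^^^ (nbs.getD j 0 <<< pvSh j)) nbs]
    simp [pvG]

lemma pv_fin_zero : pvFin (List.replicate 24 0) = 0 := by decide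

lemma pv_pyRange24 : PySem.List.pyRange 0 24 1 = (List.range 24).map (fun (x : Nat) => (x : Int)) := by
  decide

-- ===== VERDICT (by name: the statement is the Claim_ definition above) =====
theorem inputParse_spec : Claim_equal_inputParse := by
  intro userInput _
  unfold Spec_inputParse inputParse inputParse_alt
  simp only []
  have hA := pv_A userInput.toList 0 0
  have hBupd := pv_B_upd userInput.toList 0 (List.replicate 24 0)
  have hfin := pv_B_fin (List.range 24) 0 (pvBupd userInput.toList 0 (List.replicate 24 0))
  have hcore := pv_core userInput.toList 0 (List.replicate 24 0) (by simp)
  rw [pv_fin_zero, Nat.zero_xor] at hcore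
  simp only [Nat.mul_zero, Nat.zero_mod, Nat.cast_zero, Nat.zero_xor] at hA hfin
  simp only [Nat.cast_zero, List.map_replicate] at hBupd
  rw [hA, hBupd, pv_pyRange24, hfin]
  rw [show pvG (List.range 24) (pvBupd userInput.toList 0 (List.replicate 24 0)) 0
      = pvFin (pvBupd userInput.toList 0 (List.replicate 24 0)) from rfl, hcore]
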